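-- pv_equiv track=rewrite | github.com/aw0605/CodingTest | 프로그래머스/2/77885. 2개 이하로 다른 비트/2개 이하로 다른 비트.py | f
-- ===== SOURCE A (Python) =====
-- def f(number):
--     bin_num = bin(number)[2:]
--
--     if '0' not in bin_num:
--         return int('10' + bin_num[1:], 2)
--
--     bin_num = list(bin_num)
--     for i in range(len(bin_num)):
--         if bin_num[-i-1] == '0':
--             bin_num[-i-1] = '1'
--             break
--
--     if i > 0:
--         bin_num[-i] = '0'
--
--     return int(''.join(bin_num), 2)
-- ===== SOURCE B (Python) =====
-- def f(number):
--     lowzero = (number + 1) & ~number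
--     number |= lowzero
--     if lowzero > 1:
--         number ^= lowzero >> 1
--     return number
-- ===== Notes on version B (the rewrite author's own statement) =====
-- stated objective: simpler
-- what changed: Replaces A's binary-string construction, char-scan loop with list mutation, and all-ones special branch by three branch-light integer bitwise operations ((n+1)&~n isolates the lowest zero bit) with no string or list at all.
-- outside the precondition, e.g. on f(-1): A returns 5, B returns -1; on f(-3): A returns 11, B returns -2; on f(-2): A raises ValueError, B returns -1
import Mathlib
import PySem

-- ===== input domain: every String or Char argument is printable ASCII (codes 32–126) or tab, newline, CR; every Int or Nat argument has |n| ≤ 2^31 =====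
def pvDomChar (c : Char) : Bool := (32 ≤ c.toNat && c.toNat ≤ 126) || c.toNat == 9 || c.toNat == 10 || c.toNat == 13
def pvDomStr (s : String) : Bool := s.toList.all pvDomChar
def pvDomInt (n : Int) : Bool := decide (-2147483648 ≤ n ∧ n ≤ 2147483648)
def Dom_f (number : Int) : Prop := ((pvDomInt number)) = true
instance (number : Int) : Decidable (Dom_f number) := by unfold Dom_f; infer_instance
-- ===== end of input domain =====

-- B replaces A's binary-string scan (build bin(number), scan chars from the right, patch the
-- list, re-parse) by three integer bitwise operations with no string/list at all (objective:
-- simpler/alternative; the proof shows equality for all number ≥ 0).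

-- ===== PORT A =====

-- binary digit characters of n, most significant first: bin(n)[2:] for n > 0 (empty for n = 0)
def binChars (n : Nat) : List Char :=
  if h : n = 0 then []
  else have _ := h; binChars (n / 2) ++ [if n % 2 = 1 then '1' else '0']
decreasing_by exact Nat.div_lt_self (Nat.pos_of_ne_zero h) one_lt_two

-- int(s, 2) on a string of '0'/'1' characters
def parse2 (l : List Char) : Nat :=
  l.foldl (fun a c => 2 * a + (if c = '1' then 1 else 0)) 0

-- the for-loop: scan i = 0,1,… ; bin_num[-i-1] is index len-1-i; on the first '0' set it to '1'
-- and break, returning the list and the loop variable i (Python leaves i = len-1 if no break)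
def loopA (l : List Char) (i : Nat) : List Char × Nat :=
  if i < l.length then
    if l.getD (l.length - 1 - i) ' ' = '0' then (l.set (l.length - 1 - i) '1', i)
    else loopA l (i + 1)
  else (l, l.length - 1)
termination_by l.length - i

-- port of A; exact for number ≥ 0 (= Pre_f; Python's bin slicing makes A raise ValueError on
-- negatives except -(2^k-1), see Pre_f)
def f (number : Int) : Int :=
  let bin_num := if number.toNat = 0 then ['0'] else binChars number.toNat
  if '0' ∉ bin_num then
    Int.ofNat (parse2 ('1' :: '0' :: bin_num.drop 1))      -- int('10' + bin_num[1:], 2)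
  else
    let r := loopA bin_num 0
    let l := if r.2 > 0 then r.1.set (r.1.length - r.2) '0' else r.1   -- bin_num[-i] = '0'
    Int.ofNat (parse2 l)

-- ===== PORT B =====
def f_alt (number : Int) : Int :=
  let lowzero := Int.land (number + 1) (~~~number)    -- (number + 1) & ~number
  let number := Int.lor number lowzero                -- number |= lowzero
  if lowzero > 1 then Int.xor number (lowzero >>> (1 : Int)) else number  -- number ^= lowzero >> 1

-- ===== PRECONDITION & SPEC =====
-- Pre_f restricts to the problem's natural domain (nonnegative integers): on negative input A's
-- 'bin(number)[2:]' keeps the 'b' of '-0b', so A raises ValueError on every negative number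
-- except -(2^k-1), where it returns an accidental misparse (e.g. A(-1) = 5) that B does not mimic.
def Pre_f (number : Int) : Prop := 0 ≤ number
instance (number : Int) : Decidable (Pre_f number) := by unfold Pre_f; infer_instance

def pvWitness_f : Int := 5

def Spec_f (number : Int) (out : Int) : Prop := out = f_alt number
instance (number : Int) (out : Int) : Decidable (Spec_f number out) := by unfold Spec_f; infer_instance

-- ===== CLAIM (what is proved, stated in full; the proofs are below) =====
def Claim_equal_f : Prop := ∀ (number : Int), Dom_f number → Pre_f number → Spec_f number (f number)

-- ===== LEMMAS AND PROOFS =====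

-- binary digits, least significant first (proof-side mirror of binChars)
def bitsLE (n : Nat) : List Char :=
  if h : n = 0 then []
  else (if n % 2 = 1 then '1' else '0') :: bitsLE (n / 2)
decreasing_by exact Nat.div_lt_self (Nat.pos_of_ne_zero h) one_lt_two

theorem binChars_eq_reverse (n : Nat) : binChars n = (bitsLE n).reverse := by
  induction n using Nat.strong_induction_on with
  | _ n ih =>
    rw [binChars, bitsLE]
    by_cases h : n = 0
    · simp only [dif_pos h, List.reverse_nil]
    · simp only [dif_neg h, List.reverse_cons,
        ih (n / 2) (Nat.div_lt_self (Nat.pos_of_ne_zero h) one_lt_two)]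

theorem parse2_foldl (l : List Char) (a : Nat) :
    l.foldl (fun a c => 2 * a + (if c = '1' then 1 else 0)) a = a * 2 ^ l.length + parse2 l := by
  induction l generalizing a with
  | nil => simp only [List.foldl_nil, parse2, List.length_nil, pow_zero]; omega
  | cons c t ih =>
    rw [List.foldl_cons, ih]
    have hP : parse2 (c :: t)
        = (2 * 0 + (if c = '1' then 1 else 0)) * 2 ^ t.length + parse2 t := by
      rw [parse2, List.foldl_cons, ih]
    rw [hP, List.length_cons]
    ring

theorem parse2_append (x y : List Char) :
    parse2 (x ++ y) = parse2 x * 2 ^ y.length + parse2 y := by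
  simp only [parse2, List.foldl_append]
  rw [parse2_foldl]
  rfl

theorem parse2_replicate (p : Nat) : parse2 (List.replicate p '1') = 2 ^ p - 1 := by
  induction p with
  | zero => rfl
  | succ p ih =>
    have h1 : (1:Nat) ≤ 2 ^ p := Nat.one_le_two_pow
    rw [List.replicate_succ, parse2, List.foldl_cons]
    rw [parse2_foldl]
    simp only [List.length_replicate, parse2] at *
    norm_num
    omega

theorem parse2_binChars (n : Nat) : parse2 (binChars n) = n := by
  induction n using Nat.strong_induction_on with
  | _ n ih =>
    rw [binChars]
    by_cases h : n = 0
    · simp [h, parse2]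
    · rw [dif_neg h, parse2_append, ih (n / 2) (Nat.div_lt_self (Nat.pos_of_ne_zero h) one_lt_two)]
      have : parse2 [if n % 2 = 1 then '1' else '0'] = n % 2 := by
        rcases Nat.mod_two_eq_zero_or_one n with h2 | h2 <;> simp [h2, parse2]
      simp only [List.length_cons, List.length_nil, this]
      omega

theorem exists_decomp (n : Nat) : ∃ p m, n = 2 ^ (p + 1) * m + (2 ^ p - 1) := by
  induction n using Nat.strong_induction_on with
  | _ n ih =>
    rcases Nat.even_or_odd n with he | ho
    · exact ⟨0, n / 2, by obtain ⟨k, hk⟩ := he; omega⟩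
    · obtain ⟨k, hk⟩ := ho
      obtain ⟨p, m, hm⟩ := ih k (by omega)
      refine ⟨p + 1, m, ?_⟩
      have h1 : (1:Nat) ≤ 2 ^ p := Nat.one_le_two_pow
      have e1 : (2:Nat) ^ (p + 1) * m = 2 * (2 ^ p * m) := by ring
      have e2 : (2:Nat) ^ (p + 1 + 1) * m = 4 * (2 ^ p * m) := by ring
      omega

theorem bitsLE_decomp (p m : Nat) :
    bitsLE (2 ^ (p + 1) * m + (2 ^ p - 1)) =
      List.replicate p '1' ++ (if m = 0 then [] else '0' :: bitsLE m) := by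
  induction p with
  | zero =>
    simp only [pow_one, pow_zero, Nat.sub_self, Nat.add_zero, List.replicate_zero, List.nil_append]
    rw [bitsLE]
    by_cases h : m = 0
    · simp [h]
    · have h2 : 2 * m ≠ 0 := by omega
      have h3 : 2 * m % 2 = 0 := by omega
      have h4 : 2 * m / 2 = m := by omega
      simp [h, h2, h3, h4]
  | succ p ih =>
    have h1 : (1:Nat) ≤ 2 ^ p := Nat.one_le_two_pow
    have e1 : (2:Nat) ^ (p + 1) = 2 * 2 ^ p := by ring
    have e2 : (2:Nat) ^ (p + 1) * m = 2 * (2 ^ p * m) := by ring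
    have e3 : (2:Nat) ^ (p + 1 + 1) * m = 4 * (2 ^ p * m) := by ring
    set n' := 2 ^ (p + 1) * m + (2 ^ p - 1) with hn'
    have key : 2 ^ (p + 1 + 1) * m + (2 ^ (p + 1) - 1) = 2 * n' + 1 := by omega
    rw [key, bitsLE]
    have h2 : 2 * n' + 1 ≠ 0 := by omega
    have h3 : (2 * n' + 1) % 2 = 1 := by omega
    have h4 : (2 * n' + 1) / 2 = n' := by omega
    simp only [dif_neg h2, h3, h4, ih, List.replicate_succ, List.cons_append]
    norm_num

theorem loopA_go (x : List Char) (p : Nat) :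
    ∀ k j, j ≤ p → p - j = k →
      loopA (x ++ '0' :: List.replicate p '1') j = (x ++ '1' :: List.replicate p '1', p) := by
  intro k
  induction k with
  | zero =>
    intro j hj hk
    have hjp : j = p := by omega
    subst hjp
    rw [loopA]
    have hlen : (x ++ '0' :: List.replicate j '1').length = x.length + j + 1 := by simp only [List.length_append, List.length_cons, List.length_replicate]; omega
    have hlt : j < (x ++ '0' :: List.replicate j '1').length := by omega
    have hidx : (x ++ '0' :: List.replicate j '1').length - 1 - j = x.length := by omega
    have hget : (x ++ '0' :: List.replicate j '1').getD x.length ' ' = '0' := by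
      have : x.length < (x ++ '0' :: List.replicate j '1').length := by omega
      rw [List.getD_eq_getElem _ _ this]
      rw [List.getElem_append_right (by omega)]
      simp
    rw [if_pos hlt, hidx, hget, if_pos rfl]
    have hset : (x ++ '0' :: List.replicate j '1').set x.length '1'
        = x ++ '1' :: List.replicate j '1' := by
      rw [List.set_append]
      simp
    rw [hset]
  | succ k ih =>
    intro j hj hk
    have hjp : j < p := by omega
    rw [loopA]
    have hlen : (x ++ '0' :: List.replicate p '1').length = x.length + p + 1 := by simp only [List.length_append, List.length_cons, List.length_replicate]; omega
    have hlt : j < (x ++ '0' :: List.replicate p '1').length := by omega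
    have hidx : (x ++ '0' :: List.replicate p '1').length - 1 - j = x.length + 1 + (p - 1 - j) := by
      omega
    have hget : (x ++ '0' :: List.replicate p '1').getD (x.length + 1 + (p - 1 - j)) ' ' = '1' := by
      have hin : x.length + 1 + (p - 1 - j) < (x ++ '0' :: List.replicate p '1').length := by omega
      rw [List.getD_eq_getElem _ _ hin]
      rw [List.getElem_append_right (by omega)]
      have : x.length + 1 + (p - 1 - j) - x.length = (p - 1 - j) + 1 := by omega
      simp only [this, List.getElem_cons_succ]
      exact List.getElem_replicate _
    rw [if_pos hlt, hidx, hget]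
    have : ¬ ('1' : Char) = '0' := by decide
    rw [if_neg this]
    exact ih (j + 1) (by omega) (by omega)

theorem loopA_run (x : List Char) (p : Nat) :
    loopA (x ++ '0' :: List.replicate p '1') 0 = (x ++ '1' :: List.replicate p '1', p) :=
  loopA_go x p p 0 (Nat.zero_le p) rfl

-- value of the common answer: E p m = A's and B's output on n = 2^(p+1)m + 2^p - 1
def Eval : Nat → Nat → Nat
  | 0, m => 2 * m + 1
  | q + 1, m => 2 ^ (q + 2) * m + 2 ^ (q + 1) + (2 ^ q - 1)

theorem Eval_zero (m : Nat) : Eval 0 m = 2 * m + 1 := rfl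

theorem Eval_succ (q m : Nat) : Eval (q + 1) m = 2 ^ (q + 2) * m + 2 ^ (q + 1) + (2 ^ q - 1) := rfl

theorem parse2_one_zero_rep (q : Nat) :
    parse2 ('1' :: '0' :: List.replicate q '1') = 2 ^ (q + 1) + (2 ^ q - 1) := by
  have : ('1' :: '0' :: List.replicate q '1') = ['1', '0'] ++ List.replicate q '1' := rfl
  rw [this, parse2_append, parse2_replicate]
  have h1 : (1:Nat) ≤ 2 ^ q := Nat.one_le_two_pow
  have : parse2 ['1', '0'] = 2 := rfl
  rw [this]
  simp only [List.length_replicate]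
  have e1 : (2:Nat) ^ (q + 1) = 2 * 2 ^ q := by ring
  omega

theorem f_val (p m : Nat) :
    f ((2 ^ (p + 1) * m + (2 ^ p - 1) : Nat) : Int) = Int.ofNat (Eval p m) := by
  set n := 2 ^ (p + 1) * m + (2 ^ p - 1) with hn
  have htn : ((n : Int)).toNat = n := Int.toNat_natCast n
  have h1 : (1:Nat) ≤ 2 ^ p := Nat.one_le_two_pow
  by_cases hm : m = 0
  · subst hm
    by_cases hp : p = 0
    · subst hp
      have hz : n = 0 := by simp [hn]
      rw [hz, f]
      have hmem : ¬ ('0' ∉ (['0'] : List Char)) := by decide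
      have hrun : loopA ['0'] 0 = (['1'], 0) := by
        have h' : (['0'] : List Char) = [] ++ '0' :: List.replicate 0 '1' := rfl
        rw [h', loopA_run]
        rfl
      simp [hrun, parse2, Eval]
    · -- n = 2^p - 1 > 0 : all-ones branch
      have hn0 : n ≠ 0 := by
        have : (2:Nat) ≤ 2 ^ p := by
          calc (2:Nat) = 2 ^ 1 := rfl
          _ ≤ 2 ^ p := Nat.pow_le_pow_right (by omega) (by omega)
        omega
      have hbits : bitsLE n = List.replicate p '1' := by
        rw [hn, bitsLE_decomp]; simp
      have hbin : binChars n = List.replicate p '1' := by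
        rw [binChars_eq_reverse, hbits, List.reverse_replicate]
      rw [f]
      simp only [htn, if_neg hn0, hbin]
      have hmem : '0' ∉ List.replicate p '1' := by
        simp [List.mem_replicate]
      rw [if_pos hmem]
      have hdrop : (List.replicate p '1').drop 1 = List.replicate (p - 1) '1' := by
        rcases Nat.exists_eq_succ_of_ne_zero hp with ⟨q, hq⟩
        subst hq
        simp [List.replicate_succ]
      rw [hdrop, parse2_one_zero_rep]
      rcases Nat.exists_eq_succ_of_ne_zero hp with ⟨q, hq⟩
      subst hq
      simp only [Nat.succ_eq_add_one, Nat.add_sub_cancel]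
      congr 1
      rw [Eval_succ]
      omega
  · -- m ≥ 1 : '0' occurs, the loop fires at i = p
    have hn0 : n ≠ 0 := by
      have : 2 ^ (p + 1) * m ≥ 2 := by
        have : (2:Nat) ≤ 2 ^ (p + 1) := by
          calc (2:Nat) = 2 ^ 1 := rfl
          _ ≤ 2 ^ (p + 1) := Nat.pow_le_pow_right (by omega) (by omega)
        calc (2:Nat) = 2 * 1 := rfl
        _ ≤ 2 ^ (p + 1) * m := Nat.mul_le_mul this (by omega)
      omega
    have hbits : bitsLE n = List.replicate p '1' ++ '0' :: bitsLE m := by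
      rw [hn, bitsLE_decomp, if_neg hm]
    have hbin : binChars n = (bitsLE m).reverse ++ '0' :: List.replicate p '1' := by
      rw [binChars_eq_reverse, hbits, List.reverse_append, List.reverse_cons,
        List.reverse_replicate]
      simp
    have hparse_x : parse2 ((bitsLE m).reverse) = m := by
      rw [← binChars_eq_reverse, parse2_binChars]
    rw [f]
    simp only [htn, if_neg hn0, hbin]
    have hmem : '0' ∈ (bitsLE m).reverse ++ '0' :: List.replicate p '1' := by
      simp
    rw [if_neg (by simpa using hmem)]
    rw [loopA_run]
    set x := (bitsLE m).reverse with hx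
    by_cases hp : p = 0
    · subst hp
      simp only [List.replicate_zero, gt_iff_lt, Nat.lt_irrefl, if_false]
      rw [parse2_append]
      simp only [hparse_x, List.length_cons, List.length_nil]
      have : parse2 ['1'] = 1 := rfl
      rw [this]
      rw [Eval_zero]
      congr 1
      ring
    · rw [if_pos (by omega : p > 0)]
      have hlen : (x ++ '1' :: List.replicate p '1').length = x.length + p + 1 := by simp only [List.length_append, List.length_cons, List.length_replicate]; omega
      have hidx : (x ++ '1' :: List.replicate p '1').length - p = x.length + 1 := by omega
      rcases Nat.exists_eq_succ_of_ne_zero hp with ⟨q, hq⟩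
      have hset : (x ++ '1' :: List.replicate p '1').set (x.length + 1) '0'
          = x ++ '1' :: '0' :: List.replicate q '1' := by
        rw [List.set_append, if_neg (by omega)]
        have : x.length + 1 - x.length = 1 := by omega
        rw [this]
        subst hq
        simp [List.replicate_succ]
      rw [hidx, hset, parse2_append]
      have : parse2 ('1' :: '0' :: List.replicate q '1') = 2 ^ (q + 1) + (2 ^ q - 1) :=
        parse2_one_zero_rep q
      rw [this]
      simp only [hparse_x, List.length_cons, List.length_replicate]
      subst hq
      simp only [Nat.succ_eq_add_one]
      rw [Eval_succ]
      congr 1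
      have h2 : (1:Nat) ≤ 2 ^ q := Nat.one_le_two_pow
      have e1 : (2:Nat) ^ (q + 1) = 2 * 2 ^ q := by ring
      have e2 : (2:Nat) ^ (q + 2) * m = m * 2 ^ (q + 1 + 1) := by ring
      omega

-- ---- B-side bit lemmas ----

theorem testBit_H (p : Nat) : ∀ k i, Nat.testBit (2 ^ p * k + (2 ^ p - 1)) i
    = if i < p then true else Nat.testBit k (i - p) := by
  induction p with
  | zero => intro k i; simp
  | succ p ih =>
    intro k i
    have h1 : (1:Nat) ≤ 2 ^ p := Nat.one_le_two_pow
    have e1 : (2:Nat) ^ (p + 1) = 2 * 2 ^ p := by ring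
    have e2 : (2:Nat) ^ (p + 1) * k = 2 * (2 ^ p * k) := by ring
    have key : 2 ^ (p + 1) * k + (2 ^ (p + 1) - 1) = 2 * (2 ^ p * k + (2 ^ p - 1)) + 1 := by
      omega
    rw [key]
    cases i with
    | zero =>
      rw [Nat.testBit_zero, if_pos (Nat.zero_lt_succ p)]
      simp only [decide_eq_true_eq]
      omega
    | succ i =>
      rw [Nat.testBit_succ]
      have hd : (2 * (2 ^ p * k + (2 ^ p - 1)) + 1) / 2 = 2 ^ p * k + (2 ^ p - 1) := by omega
      rw [hd, ih k i]
      by_cases h : i < p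
      · simp [h, Nat.succ_lt_succ h]
      · simp only [if_neg h, if_neg (by omega : ¬ i + 1 < p + 1)]
        congr 1
        omega

theorem testBit_G (p : Nat) : ∀ k i, Nat.testBit (2 ^ p * k) i
    = if i < p then false else Nat.testBit k (i - p) := by
  induction p with
  | zero => intro k i; simp
  | succ p ih =>
    intro k i
    have key : 2 ^ (p + 1) * k = 2 * (2 ^ p * k) := by ring
    rw [key]
    cases i with
    | zero =>
      rw [Nat.testBit_zero, if_pos (Nat.zero_lt_succ p)]
      simp only [decide_eq_false_iff_not]
      omega
    | succ i =>
      rw [Nat.testBit_succ]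
      have hd : 2 * (2 ^ p * k) / 2 = 2 ^ p * k := by omega
      rw [hd, ih k i]
      by_cases h : i < p
      · simp [h, Nat.succ_lt_succ h]
      · simp only [if_neg h, if_neg (by omega : ¬ i + 1 < p + 1)]
        congr 1
        omega

theorem testBit_one' (j : Nat) : Nat.testBit 1 j = decide (j = 0) := by
  cases j with
  | zero => rfl
  | succ j => simp [Nat.testBit_succ]

theorem ldiff_lemma (p m : Nat) :
    Nat.ldiff (2 ^ (p + 1) * m + (2 ^ p - 1) + 1) (2 ^ (p + 1) * m + (2 ^ p - 1)) = 2 ^ p := by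
  have h1 : (1:Nat) ≤ 2 ^ p := Nat.one_le_two_pow
  have e1 : (2:Nat) ^ (p + 1) = 2 * 2 ^ p := by ring
  have e2 : (2:Nat) ^ (p + 1) * m = 2 * (2 ^ p * m) := by ring
  have e3 : (2:Nat) ^ p * (2 * m + 1) = 2 * (2 ^ p * m) + 2 ^ p := by ring
  have e4 : (2:Nat) ^ p * (2 * m) = 2 * (2 ^ p * m) := by ring
  have hsucc : 2 ^ (p + 1) * m + (2 ^ p - 1) + 1 = 2 ^ p * (2 * m + 1) := by omega
  have hself : 2 ^ (p + 1) * m + (2 ^ p - 1) = 2 ^ p * (2 * m) + (2 ^ p - 1) := by omega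
  have h2p : (2:Nat) ^ p = 2 ^ p * 1 := by omega
  apply Nat.eq_of_testBit_eq
  intro i
  rw [Nat.testBit_ldiff, hsucc, hself, testBit_G, testBit_H]
  conv_rhs => rw [h2p]
  rw [testBit_G]
  by_cases h : i < p
  · simp [h]
  · simp only [if_neg h]
    rcases Nat.lt_or_ge p i with hlt | hge
    · have : i - p = (i - p - 1) + 1 := by omega
      rw [this, testBit_one']
      set j := i - p - 1
      have hA : Nat.testBit (2 * m + 1) (j + 1) = Nat.testBit m j := by
        have : 2 * m + 1 = 2 ^ 1 * m + (2 ^ 1 - 1) := by omega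
        rw [this, testBit_H]
        simp
      have hB : Nat.testBit (2 * m) (j + 1) = Nat.testBit m j := by
        have : 2 * m = 2 ^ 1 * m := by omega
        rw [this, testBit_G]
        simp
      rw [hA, hB]
      simp
    · have hip : i = p := by omega
      subst hip
      simp only [Nat.sub_self, testBit_one']
      have hA : Nat.testBit (2 * m + 1) 0 = true := by
        rw [Nat.testBit_zero]; simp only [decide_eq_true_eq]; omega
      have hB : Nat.testBit (2 * m) 0 = false := by
        rw [Nat.testBit_zero]; simp only [decide_eq_false_iff_not]; omega
      rw [hA, hB]
      simp

theorem lor_lemma (p m : Nat) :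
    (2 ^ (p + 1) * m + (2 ^ p - 1)) ||| 2 ^ p = 2 ^ (p + 1) * m + (2 ^ (p + 1) - 1) := by
  have h1 : (1:Nat) ≤ 2 ^ p := Nat.one_le_two_pow
  have e1 : (2:Nat) ^ (p + 1) = 2 * 2 ^ p := by ring
  have e2 : (2:Nat) ^ (p + 1) * m = 2 * (2 ^ p * m) := by ring
  have e4 : (2:Nat) ^ p * (2 * m) = 2 * (2 ^ p * m) := by ring
  have hself : 2 ^ (p + 1) * m + (2 ^ p - 1) = 2 ^ p * (2 * m) + (2 ^ p - 1) := by omega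
  have h2p : (2:Nat) ^ p = 2 ^ p * 1 := by omega
  apply Nat.eq_of_testBit_eq
  intro i
  rw [Nat.testBit_lor, hself, testBit_H]
  conv_lhs => rw [h2p]
  rw [testBit_G]
  have htgt2 : 2 ^ (p + 1) * m + (2 ^ (p + 1) - 1) = 2 ^ (p + 1) * m + (2 ^ (p + 1) - 1) := rfl
  rw [testBit_H (p + 1) m i]
  by_cases h : i < p
  · simp [h, (by omega : i < p + 1)]
  · simp only [if_neg h]
    rcases Nat.lt_or_ge p i with hlt | hge
    · have hnp1 : ¬ i < p + 1 := by omega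
      rw [if_neg hnp1, testBit_one']
      have : i - p = (i - p - 1) + 1 := by omega
      rw [this]
      have hB : Nat.testBit (2 * m) (i - p - 1 + 1) = Nat.testBit m (i - p - 1) := by
        have : 2 * m = 2 ^ 1 * m := by omega
        rw [this, testBit_G]; simp
      rw [hB]
      have : i - (p + 1) = i - p - 1 := by omega
      rw [this]
      simp
    · have hip : i = p := by omega
      subst hip
      rw [if_pos (by omega : i < i + 1)]
      simp

theorem xor_lemma (q m : Nat) :
    (2 ^ (q + 2) * m + (2 ^ (q + 2) - 1)) ^^^ 2 ^ q
      = 2 ^ q * (4 * m + 2) + (2 ^ q - 1) := by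
  have h1 : (1:Nat) ≤ 2 ^ q := Nat.one_le_two_pow
  have hself : 2 ^ (q + 2) * m + (2 ^ (q + 2) - 1) = 2 ^ (q + 2) * m + (2 ^ (q + 2) - 1) := rfl
  have h2q : (2:Nat) ^ q = 2 ^ q * 1 := by omega
  apply Nat.eq_of_testBit_eq
  intro i
  rw [Nat.testBit_xor, testBit_H (q + 2) m i]
  conv_lhs => rw [h2q]
  rw [testBit_G, testBit_H q (4 * m + 2) i]
  by_cases h : i < q
  · simp [h, (by omega : i < q + 2)]
  · simp only [if_neg h]
    rcases Nat.lt_or_ge q i with hlt | hge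
    · rw [testBit_one']
      have hd : i - q = (i - q - 1) + 1 := by omega
      rw [hd]
      have hR : Nat.testBit (4 * m + 2) (i - q - 1 + 1) = Nat.testBit (2 * m + 1) (i - q - 1) := by
        have : 4 * m + 2 = 2 ^ 1 * (2 * m + 1) := by omega
        rw [this, testBit_G]; simp
      rw [hR]
      set j := i - q - 1 with hj
      have hL : Nat.testBit (2 * m + 1) j = if j < 1 then true else Nat.testBit m (j - 1) := by
        have : 2 * m + 1 = 2 ^ 1 * m + (2 ^ 1 - 1) := by omega
        rw [this, testBit_H]
      by_cases hi2 : i < q + 2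
      · have hj0 : j = 0 := by omega
        simp [hi2, hj0]
      · have hj1 : 1 ≤ j := by omega
        have : i - (q + 2) = j - 1 := by omega
        simp only [if_neg hi2, this, hL, if_neg (by omega : ¬ j < 1)]
        simp
    · have hiq : i = q := by omega
      subst hiq
      rw [if_pos (by omega : i < i + 2), testBit_one']
      simp
      omega

theorem f_alt_val (p m : Nat) :
    f_alt ((2 ^ (p + 1) * m + (2 ^ p - 1) : Nat) : Int) = Int.ofNat (Eval p m) := by
  have h1 : (1:Nat) ≤ 2 ^ p := Nat.one_le_two_pow
  set n := 2 ^ (p + 1) * m + (2 ^ p - 1) with hn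
  show f_alt (Int.ofNat n) = Int.ofNat (Eval p m)
  rw [f_alt]
  have hadd : (Int.ofNat n) + 1 = Int.ofNat (n + 1) := rfl
  have hnot : ~~~(Int.ofNat n) = Int.negSucc n := rfl
  have hland : Int.land (Int.ofNat (n + 1)) (Int.negSucc n) = Int.ofNat (Nat.ldiff (n + 1) n) := rfl
  have hld : Nat.ldiff (n + 1) n = 2 ^ p := ldiff_lemma p m
  have hlor : Int.lor (Int.ofNat n) (Int.ofNat (2 ^ p)) = Int.ofNat (n ||| 2 ^ p) := rfl
  have hor : n ||| 2 ^ p = 2 ^ (p + 1) * m + (2 ^ (p + 1) - 1) := lor_lemma p m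
  simp only [hadd, hnot, hland, hld, hlor, hor]
  by_cases hp : p = 0
  · subst hp
    rw [if_neg (by decide : ¬ (1:Int) < Int.ofNat (2 ^ 0))]
    rw [Eval_zero]
    congr 1
  · have hgt : (1:Int) < Int.ofNat (2 ^ p) := by
      have h2 : (2:Nat) ≤ 2 ^ p := by
        calc (2:Nat) = 2 ^ 1 := rfl
        _ ≤ 2 ^ p := Nat.pow_le_pow_right (by omega) (by omega)
      exact Int.ofNat_lt.2 (lt_of_lt_of_le one_lt_two h2)
    rw [if_pos hgt]
    rcases Nat.exists_eq_succ_of_ne_zero hp with ⟨q, hq⟩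
    subst hq
    have hshift : (Int.ofNat (2 ^ (q + 1))) >>> (1 : Int) = Int.ofNat (2 ^ (q + 1) >>> 1) := rfl
    have hpow : 2 ^ (q + 1) >>> 1 = 2 ^ q := by
      rw [Nat.shiftRight_succ, Nat.shiftRight_zero]
      have : (2:Nat) ^ (q + 1) = 2 * 2 ^ q := by ring
      omega
    have hxor : Int.xor (Int.ofNat (2 ^ (q + 1 + 1) * m + (2 ^ (q + 1 + 1) - 1)))
          (Int.ofNat (2 ^ q))
        = Int.ofNat ((2 ^ (q + 2) * m + (2 ^ (q + 2) - 1)) ^^^ 2 ^ q) := rfl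
    rw [hshift, hpow, hxor, xor_lemma]
    rw [Eval_succ]
    congr 1
    have h2 : (1:Nat) ≤ 2 ^ q := Nat.one_le_two_pow
    have e1 : (2:Nat) ^ (q + 1) = 2 * 2 ^ q := by ring
    have e3 : (2:Nat) ^ q * (4 * m + 2) = 4 * (2 ^ q * m) + 2 * 2 ^ q := by ring
    have e4 : (2:Nat) ^ (q + 2) * m = 4 * (2 ^ q * m) := by ring
    omega

-- ===== VERDICT (by name: the statement is the Claim_ definition above) =====
theorem f_spec : Claim_equal_f := by
  intro number _hdom hpre
  unfold Spec_f
  have hnum : ((number.toNat : Nat) : Int) = number := Int.toNat_of_nonneg hpre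
  obtain ⟨p, m, hpm⟩ := exists_decomp number.toNat
  rw [← hnum, hpm, f_val, f_alt_val]
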